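-- pv_equiv track=rewrite | github.com/AlgoMathITMO/public-transport-network | ptn/osm.py | is_hotel_business
-- ===== SOURCE A (Python) =====
-- from typing import List, Tuple
--
-- def is_any_pair_present(tags: dict, items: List[Tuple[str, str]]) -> bool:
--     return isinstance(tags, dict) \
--            and any((key, value) in items for key, value in tags.items())
--
-- def is_hotel_business(tags: dict) -> bool:
--     items = [
--         ('leisure', 'resort'),
--         ('building', 'dormitory'),
--     ]
--     items += [('tourism', val) for val in ['hotel', 'motel', 'apartment', 'hostel',
--                                            'health_complex', 'camp', 'caravan_site',
--                                            'camp_site']]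
--
--     return is_any_pair_present(tags, items)
-- ===== SOURCE B (Python) =====
-- HOTEL_TAGS = {
--     'leisure': {'resort'},
--     'building': {'dormitory'},
--     'tourism': {'hotel', 'motel', 'apartment', 'hostel',
--                 'health_complex', 'camp', 'caravan_site', 'camp_site'},
-- }
--
--
-- def is_hotel_business(tags: dict) -> bool:
--     if not isinstance(tags, dict):
--         return False
--     return any(tags.get(key) in allowed for key, allowed in HOTEL_TAGS.items())
-- ===== Notes on version B (the rewrite author's own statement) =====
-- stated objective: idiomatic
-- what changed: B replaces the scan of all tag pairs against a reference pair list by a loop over a fixed key -> allowed-values mapping with one dict lookup into tags per reference key (tags.get(key) in allowed), so the traversal is over the 3 reference keys instead of over the tags.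
import Mathlib
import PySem

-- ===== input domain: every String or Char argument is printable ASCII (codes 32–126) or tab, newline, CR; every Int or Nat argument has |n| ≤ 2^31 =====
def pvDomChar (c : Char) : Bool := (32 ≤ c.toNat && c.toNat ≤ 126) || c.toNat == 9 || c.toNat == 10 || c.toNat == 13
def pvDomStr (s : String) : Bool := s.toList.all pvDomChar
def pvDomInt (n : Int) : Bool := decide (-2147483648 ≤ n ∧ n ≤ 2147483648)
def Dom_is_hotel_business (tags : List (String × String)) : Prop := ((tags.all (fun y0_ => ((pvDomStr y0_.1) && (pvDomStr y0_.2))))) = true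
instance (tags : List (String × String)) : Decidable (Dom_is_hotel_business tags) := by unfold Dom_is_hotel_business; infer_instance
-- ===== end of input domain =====

-- B iterates over a fixed key → allowed-values mapping with one dict lookup per key, instead of scanning
-- every tag pair against a pair list; equivalence is about the return value only (idiomatic objective).

-- ===== PORT A =====
def is_any_pair_present (tags : List (String × String)) (items : List (String × String)) : Bool :=
  -- isinstance(tags, dict) is always true under the type convention
  tags.any (fun kv => items.contains kv)

def is_hotel_business (tags : List (String × String)) : Bool :=
  let items : List (String × String) :=
    [("leisure", "resort"), ("building", "dormitory")] ++
      (["hotel", "motel", "apartment", "hostel", "health_complex", "camp",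
        "caravan_site", "camp_site"].map (fun val => ("tourism", val)))
  is_any_pair_present tags items

-- ===== PORT B =====
def HOTEL_TAGS : List (String × PySem.Set String) :=
  [("leisure", PySem.Set.ofList ["resort"]),
   ("building", PySem.Set.ofList ["dormitory"]),
   ("tourism", PySem.Set.ofList ["hotel", "motel", "apartment", "hostel",
                                 "health_complex", "camp", "caravan_site", "camp_site"])]

def is_hotel_business_alt (tags : List (String × String)) : Bool :=
  HOTEL_TAGS.any (fun ka =>
    match (PySem.Dict.mk tags).get? ka.1 with   -- tags.get(key): None when absent
    | some v => PySem.Set.contains ka.2 v        -- tags.get(key) in allowed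
    | none => false)                             -- None is never in the set

-- ===== PRECONDITION & SPEC =====
-- Pre_ excludes association lists with duplicate keys: they cannot arise from a Python dict, and which
-- of the duplicate entries a lookup sees is an accident of the list representation, not of either program.
def Pre_is_hotel_business (tags : List (String × String)) : Prop :=
  (tags.map Prod.fst).Nodup
instance (tags : List (String × String)) : Decidable (Pre_is_hotel_business tags) := by
  unfold Pre_is_hotel_business; infer_instance

def pvWitness_is_hotel_business : (List (String × String)) :=
  [("tourism", "hotel"), ("name", "Ritz")]

def Spec_is_hotel_business (tags : List (String × String)) (out : Bool) : Prop := out = is_hotel_business_alt tags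
instance (tags : List (String × String)) (out : Bool) : Decidable (Spec_is_hotel_business tags out) := by unfold Spec_is_hotel_business; infer_instance

-- ===== CLAIM (what is proved, stated in full; the proofs are below) =====
def Claim_equal_is_hotel_business : Prop := ∀ (tags : List (String × String)), Dom_is_hotel_business tags → Pre_is_hotel_business tags → Spec_is_hotel_business tags (is_hotel_business tags)

-- ===== LEMMAS AND PROOFS =====

-- a lookup-then-membership test over a nodup association list, as a scan of the list
theorem pv_get_mem_eq_any (r : String) (S : PySem.Set String) :
    ∀ (tags : List (String × String)), (tags.map Prod.fst).Nodup →
      (match (PySem.Dict.mk tags).get? r with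
       | some v => PySem.Set.contains S v
       | none => false)
        = tags.any (fun kv => (kv.1 == r) && PySem.Set.contains S kv.2) := by
  intro tags
  induction tags with
  | nil => intro _; rfl
  | cons hd tl ih =>
    intro hnd
    simp only [List.map_cons, List.nodup_cons] at hnd
    rw [List.any_cons, PySem.Dict.get?_mk_cons]
    by_cases hk : hd.1 = r
    · have htl : tl.any (fun kv => (kv.1 == r) && PySem.Set.contains S kv.2) = false := by
        rw [List.any_eq_false]
        intro kv hkv
        have hmem : kv.1 ∈ tl.map Prod.fst := List.mem_map.mpr ⟨kv, hkv, rfl⟩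
        have hne : kv.1 ≠ r := fun h => hnd.1 (by rw [hk, ← h]; exact hmem)
        simp [hne]
      have hb : (hd.1 == r) = true := by simp [hk]
      simp only [hb, if_true, Bool.true_and, htl, Bool.or_false]
    
    · have hb : (hd.1 == r) = false := by simp [hk]
      simp only [hb, Bool.false_and, Bool.false_or]
      
      exact ih hnd.2

-- swapping the two 'any's
theorem pv_any_swap {α β : Type} (l : List α) (m : List β) (f : α → β → Bool) :
    l.any (fun a => m.any (fun b => f a b)) = m.any (fun b => l.any (fun a => f a b)) := by
  rw [Bool.eq_iff_iff]
  simp only [List.any_eq_true]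
  constructor
  · rintro ⟨a, ha, b, hb, h⟩; exact ⟨b, hb, a, ha, h⟩
  · rintro ⟨b, hb, a, ha, h⟩; exact ⟨a, ha, b, hb, h⟩

-- congruence for 'any' under a pointwise-equal predicate
theorem pv_any_congr {α : Type} (l : List α) (f g : α → Bool) (h : ∀ a ∈ l, f a = g a) :
    l.any f = l.any g := by
  induction l with
  | nil => rfl
  | cons a tl ih =>
    rw [List.any_cons, List.any_cons, h a (List.mem_cons_self ..),
        ih (fun b hb => h b (List.mem_cons_of_mem _ hb))]

-- pointwise: one tag pair matches the pair list iff some reference key matches it with an allowed value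
theorem pv_pointwise (k v : String) :
    ([("leisure", "resort"), ("building", "dormitory")] ++
      (["hotel", "motel", "apartment", "hostel", "health_complex", "camp",
        "caravan_site", "camp_site"].map (fun val => ("tourism", val))) : List (String × String)).contains (k, v)
      = HOTEL_TAGS.any (fun ka => (k == ka.1) && PySem.Set.contains ka.2 v) := by
  rw [Bool.eq_iff_iff]
  simp [HOTEL_TAGS, PySem.Set.ofList, PySem.Set.add, List.contains_eq_mem, Prod.ext_iff]
  tauto

-- ===== VERDICT (by name: the statement is the Claim_ definition above) =====
theorem is_hotel_business_spec : Claim_equal_is_hotel_business := by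
  intro tags _ hpre
  unfold Spec_is_hotel_business is_hotel_business is_any_pair_present is_hotel_business_alt
  have h1 : HOTEL_TAGS.any (fun ka =>
      match (PySem.Dict.mk tags).get? ka.1 with
      | some v => PySem.Set.contains ka.2 v
      | none => false)
      = HOTEL_TAGS.any (fun ka => tags.any (fun kv => (kv.1 == ka.1) && PySem.Set.contains ka.2 kv.2)) := by
    exact pv_any_congr _ _ _ (fun ka _ => pv_get_mem_eq_any ka.1 ka.2 tags hpre)
  rw [h1, ← pv_any_swap]
  exact pv_any_congr _ _ _ (fun kv _ => by simpa using pv_pointwise kv.1 kv.2)
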